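-- pv_equiv track=rewrite | github.com/jungmiin/Algorithm | 프로그래머스/lv2/17683. ［3차］ 방금그곡/［3차］ 방금그곡.py | music_to_array
-- ===== SOURCE A (Python) =====
-- def music_to_array(music, time):
--     sound = []
--     i = 0
--     sec = 0
--     while True:
--         if time == sec:
--             break
--         if i%len(music) < len(music)-1 and music[i%len(music)+1] == '#':
--             sound.append(music[i%len(music):i%len(music)+2])
--             i += 2
--         else:
--             sound.append(music[i%len(music)])
--             i += 1
--         sec += 1
--     return sound
-- ===== SOURCE B (Python) =====
-- def music_to_array(music, time):
--     # Tokenize one period first, then emit by modular token index.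
--     notes = []
--     j = 0
--     while j < len(music):
--         if j + 1 < len(music) and music[j + 1] == '#':
--             notes.append(music[j:j + 2])
--             j += 2
--         else:
--             notes.append(music[j])
--             j += 1
--     return [notes[i % len(notes)] for i in range(time)]
-- ===== Notes on version B (the rewrite author's own statement) =====
-- stated objective: alternative
-- what changed: B first tokenizes one period of the music string into a note list in a single pass, then emits the answer as a range comprehension indexing that list by i % len(notes), instead of A's single interleaved loop that re-derives the current note from a char-index modulo the string length every second.
import Mathlib
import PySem

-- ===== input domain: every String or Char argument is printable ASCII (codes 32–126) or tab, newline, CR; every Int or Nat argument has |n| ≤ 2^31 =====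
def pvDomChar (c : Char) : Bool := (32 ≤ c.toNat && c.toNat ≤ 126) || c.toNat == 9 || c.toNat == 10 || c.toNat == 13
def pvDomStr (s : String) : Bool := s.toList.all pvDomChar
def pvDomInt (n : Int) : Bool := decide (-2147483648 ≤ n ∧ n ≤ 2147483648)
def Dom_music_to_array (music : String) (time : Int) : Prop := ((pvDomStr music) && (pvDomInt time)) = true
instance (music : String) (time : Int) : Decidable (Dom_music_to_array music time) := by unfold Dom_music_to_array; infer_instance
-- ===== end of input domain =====

-- B separates tokenization of one period from output generation (token-index modulo) instead of
-- A's single interleaved char-index-modulo loop; objective: alternative decomposition, same cost.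

-- ===== PORT A =====
-- A's while-loop: fuel = time.toNat (the loop runs exactly `time` iterations when 0 ≤ time;
-- time < 0 diverges in Python and is excluded by Pre_).
def musicLoopA (cs : List Char) (time : Int) : Nat → List String → Int → Int → List String
  | 0, sound, _, _ => sound
  | Nat.succ f, sound, i, sec =>
    if time == sec then sound
    else
      let L : Int := PySem.List.len cs
      let p : Int := PySem.Int.mod i L
      if p < L - 1 ∧ PySem.List.pyGetD cs (p + 1) ' ' = '#' then
        musicLoopA cs time f
          (sound ++ [String.ofList (PySem.List.slice cs (some p) (some (p + 2)))]) (i + 2) (sec + 1)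
      else
        musicLoopA cs time f
          (sound ++ [String.ofList [PySem.List.pyGetD cs p ' ']]) (i + 1) (sec + 1)

def music_to_array (music : String) (time : Int) : List String :=
  musicLoopA music.toList time time.toNat [] 0 0

-- ===== PORT B =====
-- Source B's j-loop over music (guard j+1 < len and music[j+1] == '#'):
def tokenizeB : List Char → List String
  | [] => []
  | [c] => [String.ofList [c]]
  | c :: d :: rest =>
    if d = '#' then String.ofList [c, d] :: tokenizeB rest
    else String.ofList [c] :: tokenizeB (d :: rest)

def music_to_array_alt (music : String) (time : Int) : List String :=
  let notes := tokenizeB music.toList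
  (PySem.List.pyRange 0 time 1).map
    (fun i => PySem.List.pyGetD notes (PySem.Int.mod i (PySem.List.len notes)) "")

-- ===== PRECONDITION & SPEC =====
-- Pre_ excludes time < 0 (A's while-loop never terminates there) and empty music with time > 0
-- (A raises ZeroDivisionError at i % len(music); B raises it too).
def Pre_music_to_array (music : String) (time : Int) : Prop :=
  0 ≤ time ∧ (time = 0 ∨ music.toList ≠ [])
instance (music : String) (time : Int) : Decidable (Pre_music_to_array music time) := by
  unfold Pre_music_to_array; infer_instance
def pvWitness_music_to_array : String × Int := ("CC#BCC#BCC#BCC#B", 9)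

def Spec_music_to_array (music : String) (time : Int) (out : List String) : Prop := out = music_to_array_alt music time
instance (music : String) (time : Int) (out : List String) : Decidable (Spec_music_to_array music time out) := by unfold Spec_music_to_array; infer_instance

-- ===== CLAIM (what is proved, stated in full; the proofs are below) =====
def Claim_equal_music_to_array : Prop := ∀ (music : String) (time : Int), Dom_music_to_array music time → Pre_music_to_array music time → Spec_music_to_array music time (music_to_array music time)

-- ===== LEMMAS AND PROOFS =====

-- emit `f` seconds from a queue of remaining tokens, wrapping around to the full list F
def cyc (F : List String) : Nat → List String → List String
  | 0, _ => []
  | _ + 1, [] => []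
  | f + 1, t :: q => t :: cyc F f (if q = [] then F else q)

theorem tokenizeB_ne_nil (cs : List Char) (h : cs ≠ []) : tokenizeB cs ≠ [] := by
  match cs with
  | [c] => simp [tokenizeB]
  | c :: d :: rest => unfold tokenizeB; split <;> simp

theorem cyc_eq_map (ts : List String) (f : Nat) :
    ∀ m, m < ts.length →
      cyc ts f (ts.drop m) = (List.range f).map (fun j => ts.getD ((m + j) % ts.length) "") := by
  induction f with
  | zero => intro m _; simp [cyc]
  | succ f ih =>
    intro m hm
    rw [List.drop_eq_getElem_cons hm, List.range_succ_eq_map, List.map_cons]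
    show cyc ts (f + 1) (ts[m] :: ts.drop (m + 1)) = _
    unfold cyc
    congr 1
    · simp [Nat.mod_eq_of_lt hm, List.getElem?_eq_getElem hm]
    · by_cases hend : m + 1 = ts.length
      · have hdrop : ts.drop (m + 1) = [] := by simp [hend]
        have h0 : 0 < ts.length := by omega
        have h := ih 0 h0
        simp only [List.drop_zero] at h
        rw [hdrop, if_pos rfl, h, List.map_map]
        apply List.map_congr_left
        intro j _
        simp only [Function.comp_apply]
        congr 1
        rw [show m + Nat.succ j = ts.length + j by omega, Nat.add_mod_left, Nat.zero_add]
      · have hlt : m + 1 < ts.length := by omega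
        have hne : ts.drop (m + 1) ≠ [] := by
          simp [List.drop_eq_nil_iff]; omega
        rw [if_neg hne, ih (m + 1) hlt, List.map_map]
        apply List.map_congr_left
        intro j _
        simp only [Function.comp_apply]
        congr 2
        omega

theorem getD_append_len {α : Type} (pre : List α) (y : α) (ys : List α) (d : α) :
    (pre ++ y :: ys).getD pre.length d = y := by
  simp [List.getD_eq_getElem?_getD]

theorem mod_step (i : Int) (L p k : Nat) (hm : i % (L : Int) = (p : Int)) :
    (i + (k : Int)) % (L : Int) = (((p + k) % L : Nat) : Int) := by
  have h2 := Int.mul_ediv_add_emod i (L : Int)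
  rw [hm] at h2
  have h1 : i + (k : Int) = ((p : Int) + (k : Int)) + (L : Int) * (i / (L : Int)) := by linarith
  rw [h1, Int.add_mul_emod_self_left]
  push_cast
  rfl

theorem main_loop (cs : List Char) (time : Int) :
    ∀ (f : Nat) (sound : List String) (i sec : Int) (pre suf : List Char),
      suf ≠ [] → cs = pre ++ suf → 0 ≤ i →
      PySem.Int.mod i (PySem.List.len cs) = (pre.length : Int) →
      sec + (f : Int) = time →
      musicLoopA cs time f sound i sec = sound ++ cyc (tokenizeB cs) f (tokenizeB suf) := by
  intro f
  induction f generalizing cs with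
  | zero => intro sound i sec pre suf _ _ _ _ _; simp [musicLoopA, cyc]
  | succ f ih =>
    intro sound i sec pre suf hsne hsplit hi hm hsec
    have hLpos : 0 < cs.length := by
      subst hsplit; rcases suf with _ | _ <;> simp_all
    have hLpos' : (0 : Int) < (cs.length : Int) := by exact_mod_cast hLpos
    have hprelt : pre.length < cs.length := by
      subst hsplit; rcases suf with _ | _ <;> simp_all
    simp only [PySem.List.len_eq] at hm
    rw [PySem.Int.mod_eq_emod_of_pos hLpos'] at hm
    have hne : (time == sec) = false := by simp; omega
    rw [musicLoopA, if_neg (by simp at hne ⊢; omega)]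
    simp only [PySem.List.len_eq, PySem.Int.mod_eq_emod_of_pos hLpos', hm]
    rcases suf with _ | ⟨c, rest⟩
    · exact absurd rfl hsne
    rcases rest with _ | ⟨d, rest⟩
    · -- suf = [c] : last char of the period, guard p < L-1 fails
      have hL : cs.length = pre.length + 1 := by subst hsplit; simp
      rw [if_neg (by intro h; have := h.1; rw [hL] at this; push_cast at this; omega)]
      have hget : PySem.List.pyGetD cs ((pre.length : Int)) ' ' = c := by
        rw [PySem.List.pyGetD_natCast, hsplit, getD_append_len]
      rw [hget]
      have hmi : PySem.Int.mod (i + 1) (PySem.List.len cs) = (([] : List Char).length : Int) := by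
        simp only [PySem.List.len_eq, PySem.Int.mod_eq_emod_of_pos hLpos']
        have hms := mod_step i cs.length pre.length 1 hm
        push_cast at hms
        rw [hms]
        simp [hL]
        
      rw [ih cs _ (i + 1) (sec + 1) [] cs (by subst hsplit; simp) (by simp) (by omega) hmi
        (by push_cast at hsec ⊢; omega)]
      simp [cyc, tokenizeB, List.append_assoc]
    · have hgetc : PySem.List.pyGetD cs ((pre.length : Int)) ' ' = c := by
        rw [PySem.List.pyGetD_natCast, hsplit, getD_append_len]
      have hcast1 : ((pre.length : Int) + 1) = ((pre.length + 1 : Nat) : Int) := by push_cast; ring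
      have hsplit' : cs = (pre ++ [c]) ++ d :: rest := by rw [hsplit]; simp
      have hgetd : PySem.List.pyGetD cs ((pre.length : Int) + 1) ' ' = d := by
        rw [hcast1, PySem.List.pyGetD_natCast, hsplit']
        have hl : pre.length + 1 = (pre ++ [c]).length := by simp
        rw [hl, getD_append_len]
      by_cases hd : d = '#'
      · subst hd
        have hguard : (pre.length : Int) < (cs.length : Int) - 1 := by
          have : pre.length + 2 ≤ cs.length := by rw [hsplit]; simp
          omega
        rw [if_pos ⟨hguard, hgetd⟩]
        have hslice : PySem.List.slice cs (some (pre.length : Int)) (some ((pre.length : Int) + 2)) =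
            [c, '#'] := by
          have h2 : ((pre.length : Int) + 2) = ((pre.length + 2 : Nat) : Int) := by push_cast; ring
          rw [h2, PySem.List.slice_natCast, hsplit, List.drop_left]
          simp
        rw [hslice]
        rcases rest with _ | ⟨e, rest⟩
        · -- wrap around: this pair ends the period
          have hL : cs.length = pre.length + 2 := by rw [hsplit]; simp
          have hmi : PySem.Int.mod (i + 2) (PySem.List.len cs) = (([] : List Char).length : Int) := by
            simp only [PySem.List.len_eq, PySem.Int.mod_eq_emod_of_pos hLpos']
            have hms := mod_step i cs.length pre.length 2 hm
            push_cast at hms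
            rw [hms]
            simp [hL]
          rw [ih cs _ (i + 2) (sec + 1) [] cs (by rw [hsplit]; simp) (by simp) (by omega) hmi
            (by push_cast at hsec ⊢; omega)]
          simp [cyc, tokenizeB, List.append_assoc]
        · -- pair token, period continues
          have hmi : PySem.Int.mod (i + 2) (PySem.List.len cs) = ((pre ++ [c, '#']).length : Int) := by
            simp only [PySem.List.len_eq, PySem.Int.mod_eq_emod_of_pos hLpos']
            have hms := mod_step i cs.length pre.length 2 hm
            push_cast at hms
            have hlt2 : pre.length + 2 < cs.length := by rw [hsplit]; simp
            rw [hms, Int.emod_eq_of_lt (by positivity) (by exact_mod_cast hlt2)]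
            simp
          rw [ih cs _ (i + 2) (sec + 1) (pre ++ [c, '#']) (e :: rest) (by simp)
            (by rw [hsplit]; simp) (by omega) hmi (by push_cast at hsec ⊢; omega)]
          rw [show tokenizeB (c :: '#' :: e :: rest) = String.ofList [c, '#'] :: tokenizeB (e :: rest)
            from by simp [tokenizeB]]
          rw [show cyc (tokenizeB cs) (f + 1) (String.ofList [c, '#'] :: tokenizeB (e :: rest)) =
              String.ofList [c, '#'] :: cyc (tokenizeB cs) f (tokenizeB (e :: rest)) from by
            rw [cyc, if_neg (tokenizeB_ne_nil _ (by simp))]]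
          simp
      · -- single token, period continues
        rw [if_neg (fun h => hd (by rw [hgetd] at h; exact h.2)), hgetc]
        have hmi : PySem.Int.mod (i + 1) (PySem.List.len cs) = ((pre ++ [c]).length : Int) := by
          simp only [PySem.List.len_eq, PySem.Int.mod_eq_emod_of_pos hLpos']
          have hms := mod_step i cs.length pre.length 1 hm
          push_cast at hms
          have hlt1 : pre.length + 1 < cs.length := by rw [hsplit]; simp
          rw [hms, Int.emod_eq_of_lt (by positivity) (by exact_mod_cast hlt1)]
          simp
        rw [ih cs _ (i + 1) (sec + 1) (pre ++ [c]) (d :: rest) (by simp)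
          (by rw [hsplit]; simp) (by omega) hmi (by push_cast at hsec ⊢; omega)]
        rw [show tokenizeB (c :: d :: rest) = String.ofList [c] :: tokenizeB (d :: rest)
          from by simp [tokenizeB, hd]]
        rw [show cyc (tokenizeB cs) (f + 1) (String.ofList [c] :: tokenizeB (d :: rest)) =
            String.ofList [c] :: cyc (tokenizeB cs) f (tokenizeB (d :: rest)) from by
          rw [cyc, if_neg (tokenizeB_ne_nil _ (by simp))]]
        simp

theorem music_to_array_spec : Claim_equal_music_to_array := by
  intro music time _ hpre
  obtain ⟨ht, hcase⟩ := hpre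
  unfold Spec_music_to_array music_to_array music_to_array_alt
  rcases hcase with h0 | hcs
  · subst h0
    simp [musicLoopA, PySem.List.pyRange_one_eq_nil]
  · have hT : tokenizeB music.toList ≠ [] := tokenizeB_ne_nil _ hcs
    have hTpos : 0 < (tokenizeB music.toList).length := List.length_pos_iff.mpr hT
    have hLpos : (0 : Int) < ((music.toList).length : Int) := by
      exact_mod_cast List.length_pos_iff.mpr hcs
    have hmain := main_loop music.toList time time.toNat [] 0 0 [] music.toList hcs
      (by simp) le_rfl
      (by simp only [PySem.List.len_eq]
          rw [PySem.Int.mod_eq_emod_of_pos hLpos]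
          simp)
      (by omega)
    rw [hmain]
    simp only [List.nil_append]
    have hcyc := cyc_eq_map (tokenizeB music.toList) time.toNat 0 hTpos
    simp only [List.drop_zero] at hcyc
    rw [hcyc, PySem.List.pyRange_one]
    simp only [sub_zero, List.map_map]
    apply List.map_congr_left
    intro k _
    simp only [Function.comp_apply, PySem.List.len_eq, zero_add]
    rw [PySem.Int.mod_eq_emod_of_pos (by exact_mod_cast hTpos), ← Int.natCast_mod,
      PySem.List.pyGetD_natCast]
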